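-- pv_equiv track=rewrite | github.com/belenes/parser | avigliano_lexer_v3.py | a_Igual
-- ===== SOURCE A (Python) =====
-- def a_Igual(src):
--     s = 1
--     for c in src:
--         if s == 1 and c == '=':
--             s = 2
--         else:
--             s = -1
--             break
--     return s == 2
-- ===== SOURCE B (Python) =====
-- def a_Igual(src):
--     return list(src) == ['=']
-- ===== Notes on version B (the rewrite author's own statement) =====
-- stated objective: simpler
-- what changed: Replaced the stateful character-by-character state machine (with break) by materializing the iterable and comparing it structurally to ['=']
import Mathlib
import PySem

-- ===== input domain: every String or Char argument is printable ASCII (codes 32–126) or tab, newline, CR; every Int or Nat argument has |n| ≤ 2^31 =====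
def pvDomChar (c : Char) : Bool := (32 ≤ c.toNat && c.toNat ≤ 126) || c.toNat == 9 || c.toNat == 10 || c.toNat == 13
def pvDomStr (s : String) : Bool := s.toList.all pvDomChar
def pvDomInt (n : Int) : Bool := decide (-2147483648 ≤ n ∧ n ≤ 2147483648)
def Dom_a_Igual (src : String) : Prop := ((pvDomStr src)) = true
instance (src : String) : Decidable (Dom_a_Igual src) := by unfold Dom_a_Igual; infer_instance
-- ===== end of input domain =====

-- B replaces A's character-by-character state machine by materializing the string
-- and comparing it structurally to ['='] (objective: simpler).


-- ===== PORT A =====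
-- loop with state s and early break, transliterated as structural recursion
def a_IgualLoop : List Char → Int → Int
  | [], s => s
  | c :: rest, s =>
    if s == 1 && c == '=' then a_IgualLoop rest 2
    else -1

def a_Igual (src : String) : Bool := a_IgualLoop src.toList 1 == 2

-- ===== PORT B =====
-- B: materialize and compare to ['=']
def a_Igual_alt (src : String) : Bool := src.toList == ['=']

-- ===== PRECONDITION & SPEC =====
def Spec_a_Igual (src : String) (out : Bool) : Prop := out = a_Igual_alt src
instance (src : String) (out : Bool) : Decidable (Spec_a_Igual src out) := by unfold Spec_a_Igual; infer_instance

-- ===== CLAIM (what is proved, stated in full; the proofs are below) =====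
def Claim_equal_a_Igual : Prop := ∀ (src : String), Dom_a_Igual src → Spec_a_Igual src (a_Igual src)

-- ===== LEMMAS AND PROOFS =====

-- ===== VERDICT (by name: the statement is the Claim_ definition above) =====
theorem a_Igual_spec : Claim_equal_a_Igual := by
  intro src _
  unfold Spec_a_Igual a_Igual a_Igual_alt
  match h : src.toList with
  | [] => simp [a_IgualLoop]
  | [c] => by_cases hc : c = '=' <;> simp [a_IgualLoop, hc]
  | c :: d :: rest =>
    by_cases hc : c = '=' <;> simp [a_IgualLoop, hc]
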